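-- pv_equiv track=rewrite | github.com/Addefan/soil-db | web/forms/plant.py | modernization_dict
-- ===== SOURCE A (Python) =====
-- LEVEL = {
--     0: "phylum",
--     1: "class",
--     2: "order",
--     3: "family",
--     4: "genus",
-- }
--
-- def modernization_dict(classification):
--     counter, level_numb = 1, 0
--     dct = {}
--     for field, name in classification.items():
--         if LEVEL[level_numb] not in dct and counter < 2:
--             dct[LEVEL[level_numb]] = [name]
--             counter += 1
--         else:
--             dct[LEVEL[level_numb]].append(name)
--             counter = 1
--             level_numb += 1
--     return dct
-- ===== SOURCE B (Python) =====
-- LEVELS = ["phylum", "class", "order", "family", "genus"]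
--
-- def modernization_dict(classification):
--     names = list(classification.values())
--     chunks = [names[2 * k:2 * k + 2] for k in range((len(names) + 1) // 2)]
--     return dict(zip(LEVELS, chunks))
-- ===== Notes on version B (the rewrite author's own statement) =====
-- stated objective: simpler
-- what changed: Instead of A's single pass with a counter/level_numb state machine mutating bucket lists in place, B first slices the value list into pairwise chunks with a comprehension and then builds the dict in one shot as dict(zip(LEVELS, chunks)) - no loop-carried state and no dict mutation.
import Mathlib
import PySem

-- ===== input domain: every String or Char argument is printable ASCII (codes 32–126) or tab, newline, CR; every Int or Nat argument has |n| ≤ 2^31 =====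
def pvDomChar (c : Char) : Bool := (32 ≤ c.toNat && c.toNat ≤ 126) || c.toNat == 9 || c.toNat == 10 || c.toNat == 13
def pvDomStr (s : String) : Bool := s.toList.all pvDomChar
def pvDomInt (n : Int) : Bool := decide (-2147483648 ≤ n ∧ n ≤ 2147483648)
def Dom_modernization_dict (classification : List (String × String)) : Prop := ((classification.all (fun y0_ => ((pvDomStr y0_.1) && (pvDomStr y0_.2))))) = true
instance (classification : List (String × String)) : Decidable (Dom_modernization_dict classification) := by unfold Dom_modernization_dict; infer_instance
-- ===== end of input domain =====

-- B replaces A's counter/level_numb state machine by staged passes: slice the values into pairwise chunks, then zip with the level names; same O(n) cost, simpler.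


-- ===== PORT A =====
-- the module constant LEVEL
def levelDict : PySem.Dict Int String :=
  PySem.Dict.mk [(0, "phylum"), (1, "class"), (2, "order"), (3, "family"), (4, "genus")]

-- one iteration of A's loop over (counter, level_numb, dct); LEVEL[level_numb] would raise KeyError
-- for level_numb ≥ 5 (ported as getD, unreachable under Pre_, which caps the length at 10)
def stepA (st : Int × Int × PySem.Dict String (List String)) (p : String × String) :
    Int × Int × PySem.Dict String (List String) :=
  let lv := levelDict.getD st.2.1 ""
  if !(st.2.2.contains lv) && decide (st.1 < 2) then
    (st.1 + 1, st.2.1, st.2.2.insert lv [p.2])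
  else
    (1, st.2.1 + 1, st.2.2.modify lv [] (· ++ [p.2]))

def modernization_dict (classification : List (String × String)) : List (String × List String) :=
  (classification.foldl stepA (1, 0, PySem.Dict.empty)).2.2.items

-- ===== PORT B =====
-- the module constant LEVELS of Source B
def levelsB : List String := ["phylum", "class", "order", "family", "genus"]

-- B: names = values; chunks = [names[2k:2k+2] for k in range((len(names)+1)//2)]; dict(zip(LEVELS, chunks))
def modernization_dict_alt (classification : List (String × String)) : List (String × List String) :=
  let names : List String := classification.map Prod.snd
  let chunks : List (List String) :=
    (PySem.List.pyRange 0 (PySem.Int.floordiv ((names.length : Int) + 1) 2) 1).map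
      (fun k => PySem.List.slice names (some (2 * k)) (some (2 * k + 2)))
  ((levelsB.zip chunks).foldl (fun d p => d.insert p.1 p.2) PySem.Dict.empty).items

-- ===== PRECONDITION & SPEC =====
-- Pre_ excludes (a) lists of more than 10 items, on which A raises KeyError (LEVEL[5]) at the 11th
-- item (B, excluded there too, would instead return the first five buckets), and (b) association lists with
-- duplicate keys, which do not represent any Python dict (the parameter is a dict; its items always
-- have distinct keys).
def Pre_modernization_dict (classification : List (String × String)) : Prop :=
  classification.length ≤ 10 ∧ (classification.map Prod.fst).Nodup
instance (classification : List (String × String)) : Decidable (Pre_modernization_dict classification) := by unfold Pre_modernization_dict; infer_instance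
def pvWitness_modernization_dict : (List (String × String)) :=
  [("phylum_field", "Ascomycota"), ("class_field", "Pezizomycetes"), ("order_field", "Pezizales")]
def Spec_modernization_dict (classification : List (String × String)) (out : List (String × List String)) : Prop := out = modernization_dict_alt classification
instance (classification : List (String × String)) (out : List (String × List String)) : Decidable (Spec_modernization_dict classification out) := by unfold Spec_modernization_dict; infer_instance

-- ===== CLAIM (what is proved, stated in full; the proofs are below) =====
def Claim_equal_modernization_dict : Prop := ∀ (classification : List (String × String)), Dom_modernization_dict classification → Pre_modernization_dict classification → Spec_modernization_dict classification (modernization_dict classification)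

-- ===== LEMMAS AND PROOFS =====

-- the name of taxonomic level j, as A looks it up
def lvlName (j : Nat) : String := levelDict.getD (j : Int) ""

-- B's chunking, written structurally: pairwise chunks, odd tail kept as a singleton
def chunksOf {α : Type} : List α → List (List α)
  | [] => []
  | [a] => [[a]]
  | a :: b :: t => [a, b] :: chunksOf t

theorem modify_eq_insert (d : PySem.Dict String (List String)) (k : String) (d0 : List String)
    (f : List String → List String) : d.modify k d0 f = d.insert k (f (d.getD k d0)) := rfl

theorem lvl_fresh (m : Nat) (hm : m ≤ 4) : lvlName m ∉ (List.range m).map lvlName := by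
  interval_cases m <;> decide

theorem levels_drop (k : Nat) (hk : k ≤ 4) :
    levelsB.drop k = lvlName k :: levelsB.drop (k + 1) := by
  interval_cases k <;> decide

-- A's loop, started at level k with counter 1 on a dict holding exactly levels 0..k-1, produces the
-- same dict as inserting the pairwise chunks of the remaining values under levels k, k+1, …
theorem loop_eq : ∀ (rest : List (String × String)) (k : Nat)
    (dct : PySem.Dict String (List String)),
    2 * k + rest.length ≤ 10 →
    dct.keys = (List.range k).map lvlName →
    (rest.foldl stepA (1, ((k : Nat) : Int), dct)).2.2
      = ((levelsB.drop k).zip (chunksOf (rest.map Prod.snd))).foldl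
          (fun d p => d.insert p.1 p.2) dct := by
  intro rest
  induction rest using chunksOf.induct with
  | case1 => intro k dct _ _; simp [chunksOf]
  | case2 p =>
    intro k dct hlen hkeys
    have hk : k ≤ 4 := by simp at hlen; omega
    have hc : dct.contains (levelDict.getD ((k : Nat) : Int) "") = false := by
      rw [PySem.Dict.contains_eq_decide_mem_keys, hkeys]
      simpa [lvlName] using lvl_fresh k hk
    simp only [List.map_cons, List.map_nil, chunksOf, levels_drop k hk, List.zip_cons_cons,
      List.foldl_cons, List.foldl_nil]
    simp [stepA, lvlName, hc]
  | case3 p q t ih =>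
    intro k dct hlen hkeys
    have hk : k ≤ 4 := by simp at hlen; omega
    have hc : dct.contains (levelDict.getD ((k : Nat) : Int) "") = false := by
      rw [PySem.Dict.contains_eq_decide_mem_keys, hkeys]
      simpa [lvlName] using lvl_fresh k hk
    -- first step: fresh level → then-branch, counter 1 → 2
    have h1 : stepA (1, ((k : Nat) : Int), dct) p
        = (2, ((k : Nat) : Int), dct.insert (lvlName k) [p.2]) := by
      simp [stepA, lvlName, hc]
    -- second step: level present → else-branch, appends and advances the level
    have hc2 : (dct.insert (lvlName k) [p.2]).contains (levelDict.getD ((k : Nat) : Int) "") = true := by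
      rw [PySem.Dict.contains_eq_decide_mem_keys]
      simp [lvlName, PySem.Dict.mem_keys_insert]
    have h2 : stepA (2, ((k : Nat) : Int), dct.insert (lvlName k) [p.2]) q
        = (1, (((k + 1 : Nat)) : Int), dct.insert (lvlName k) [p.2, q.2]) := by
      simp only [stepA, lvlName] at hc2 ⊢
      rw [modify_eq_insert]
      simp [hc2, PySem.Dict.getD_insert_self, PySem.Dict.insert_insert_self]
    have hkeys' : (dct.insert (lvlName k) [p.2, q.2]).keys
        = (List.range (k + 1)).map lvlName := by
      rw [PySem.Dict.keys_insert_of_not_contains _ _ (by simpa [lvlName] using hc), hkeys,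
        List.range_succ, List.map_append]
      simp
    simp only [List.map_cons, chunksOf, levels_drop k hk, List.zip_cons_cons, List.foldl_cons]
    rw [h1, h2, ih (k + 1) _ (by simp at hlen ⊢; omega) hkeys']

-- B's comprehension of slices equals the structural pairwise chunking
theorem chunks_eq : ∀ (names : List String),
    (List.range ((names.length + 1) / 2)).map (fun k => (names.drop (2 * k)).take 2)
      = chunksOf names := by
  intro names
  induction names using chunksOf.induct with
  | case1 => simp [chunksOf]
  | case2 a => simp [chunksOf]
  | case3 a b t ih =>
    have hm : ((a :: b :: t).length + 1) / 2 = (t.length + 1) / 2 + 1 := by simp; omega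
    rw [hm, List.range_succ_eq_map, List.map_cons, List.map_map]
    simp only [chunksOf]
    have hhead : List.take 2 (List.drop (2 * 0) (a :: b :: t)) = [a, b] := by simp
    have htail : List.map ((fun k => List.take 2 (List.drop (2 * k) (a :: b :: t))) ∘ Nat.succ)
        (List.range ((t.length + 1) / 2)) = chunksOf t := by
      rw [← ih]
      apply List.map_congr_left
      intro k _
      simp only [Function.comp_apply, Nat.succ_eq_add_one]
      have e : 2 * (k + 1) = (2 * k + 1) + 1 := by ring
      rw [e, List.drop_succ_cons, List.drop_succ_cons]
    rw [hhead, htail]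

-- B's chunk list, with the pyRange and slices evaluated
theorem alt_chunks (names : List String) :
    (PySem.List.pyRange 0 (PySem.Int.floordiv ((names.length : Int) + 1) 2) 1).map
        (fun k => PySem.List.slice names (some (2 * k)) (some (2 * k + 2)))
      = chunksOf names := by
  have h0 : ((names.length : Int) + 1) = ((names.length + 1 : Nat) : Int) := by push_cast; ring
  rw [h0, show (2 : Int) = ((2 : Nat) : Int) from rfl, PySem.Int.floordiv_natCast,
    PySem.List.pyRange_zero_natCast, List.map_map, ← chunks_eq names]
  apply List.map_congr_left
  intro k _
  have h3 : (2 * ((k : Nat) : Int) + 2) = (((2 * k : Nat)) : Int) + ((2 : Nat) : Int) := by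
    push_cast; ring
  have h2 : (2 * ((k : Nat) : Int)) = ((2 * k : Nat) : Int) := by push_cast; ring
  show PySem.List.slice names (some (2 * ((k : Nat) : Int))) (some (2 * ((k : Nat) : Int) + 2))
      = (names.drop (2 * k)).take 2
  rw [h3, h2, PySem.List.slice_natCast_add]

-- ===== VERDICT (by name: the statement is the Claim_ definition above) =====
theorem modernization_dict_spec : Claim_equal_modernization_dict := by
  intro cls _ hpre
  unfold Spec_modernization_dict modernization_dict modernization_dict_alt
  simp only [alt_chunks]
  have h := loop_eq cls 0 PySem.Dict.empty (by simpa using hpre.1) (by simp)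
  norm_num at h
  rw [h]
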